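-- pv_equiv track=rewrite | github.com/Kerber0s-inui/EDA2KiCad | src/eda2kicad/gui/schematic_import.py | _looks_like_empty_schematic_skeleton
-- ===== SOURCE A (Python) =====
-- def _looks_like_empty_schematic_skeleton(schematic_text: str) -> bool:
--     stripped_lines = [line.strip() for line in schematic_text.splitlines() if line.strip()]
--     if not stripped_lines:
--         return True
--     joined = "\n".join(stripped_lines)
--     skeleton_markers = [
--         "(kicad_sch",
--         "(version ",
--         '(generator "eeschema")',
--         "(lib_symbols)",
--         "(sheet_instances",
--         "(embedded_fonts no)",
--     ]
--     if not all(marker in joined for marker in skeleton_markers):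
--         return False
--
--     content_markers = [
--         "(symbol ",
--         "(wire ",
--         "(junction ",
--         "(text ",
--         "(label ",
--         "(hierarchical_label ",
--         "(global_label ",
--         "(bus ",
--         "(bus_entry ",
--         "(polyline ",
--         "(rectangle ",
--         "(arc ",
--         "(circle ",
--         "(image ",
--         "(sheet ",
--     ]
--     return not any(marker in joined for marker in content_markers)
-- ===== SOURCE B (Python) =====
-- def _looks_like_empty_schematic_skeleton(schematic_text: str) -> bool:
--     skeleton_markers = [
--         "(kicad_sch",
--         "(version ",
--         '(generator "eeschema")',
--         "(lib_symbols)",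
--         "(sheet_instances",
--         "(embedded_fonts no)",
--     ]
--     content_markers = [
--         "(symbol ",
--         "(wire ",
--         "(junction ",
--         "(text ",
--         "(label ",
--         "(hierarchical_label ",
--         "(global_label ",
--         "(bus ",
--         "(bus_entry ",
--         "(polyline ",
--         "(rectangle ",
--         "(arc ",
--         "(circle ",
--         "(image ",
--         "(sheet ",
--     ]
--     # one pass over the lines: per-marker presence flags instead of join + full-text scans
--     found = [False] * len(skeleton_markers)
--     content_seen = False
--     has_line = False
--     for raw in schematic_text.splitlines():
--         line = raw.strip()
--         if not line:
--             continue
--         has_line = True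
--         found = [f or (m in line) for f, m in zip(found, skeleton_markers)]
--         content_seen = content_seen or any(m in line for m in content_markers)
--     if not has_line:
--         return True
--     return all(found) and not content_seen
-- ===== Notes on version B (the rewrite author's own statement) =====
-- stated objective: alternative
-- what changed: Replaces the join-then-21-full-text-scans structure with a single line-major pass that keeps per-skeleton-marker presence flags and a content-seen boolean, never materialising the joined string.
import Mathlib
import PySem

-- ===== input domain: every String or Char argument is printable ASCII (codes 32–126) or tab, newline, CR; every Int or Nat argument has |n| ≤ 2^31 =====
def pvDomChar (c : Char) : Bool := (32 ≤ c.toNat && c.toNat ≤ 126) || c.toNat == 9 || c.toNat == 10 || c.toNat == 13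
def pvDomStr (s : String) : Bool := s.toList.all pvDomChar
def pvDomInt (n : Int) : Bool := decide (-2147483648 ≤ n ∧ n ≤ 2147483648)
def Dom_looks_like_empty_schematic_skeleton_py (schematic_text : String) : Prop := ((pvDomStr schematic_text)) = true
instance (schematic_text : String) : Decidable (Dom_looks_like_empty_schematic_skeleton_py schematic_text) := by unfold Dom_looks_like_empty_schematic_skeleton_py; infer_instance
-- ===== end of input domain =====

-- B replaces A's join-then-scan structure by a single line-major pass keeping per-marker flags (alternative decomposition, same result).

-- ===== PORT A =====
-- the two marker lists (module constants shared by both ports)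
def skeletonMarkers : List String :=
  ["(kicad_sch", "(version ", "(generator \"eeschema\")", "(lib_symbols)",
   "(sheet_instances", "(embedded_fonts no)"]

def contentMarkers : List String :=
  ["(symbol ", "(wire ", "(junction ", "(text ", "(label ", "(hierarchical_label ",
   "(global_label ", "(bus ", "(bus_entry ", "(polyline ", "(rectangle ", "(arc ",
   "(circle ", "(image ", "(sheet "]

def looks_like_empty_schematic_skeleton_py (schematic_text : String) : Bool :=
  let stripped_lines :=
    ((PySem.Str.splitlines schematic_text).filter
        (fun line => PySem.Str.strip line != "")).map (fun line => PySem.Str.strip line)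
  if stripped_lines.isEmpty then true
  else
    let joined := PySem.Str.join "\n" stripped_lines
    if !(skeletonMarkers.all (fun marker => PySem.Str.isIn marker joined)) then false
    else !(contentMarkers.any (fun marker => PySem.Str.isIn marker joined))

-- ===== PORT B =====
-- one step of B's loop over raw lines: strip, skip empties, update the flags
def bStep (st : List Bool × Bool × Bool) (raw : String) : List Bool × Bool × Bool :=
  let line := PySem.Str.strip raw
  if line = "" then st
  else
    (List.zipWith (fun f m => f || PySem.Str.isIn m line) st.1 skeletonMarkers,
     st.2.1 || contentMarkers.any (fun m => PySem.Str.isIn m line),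
     true)

def looks_like_empty_schematic_skeleton_py_alt (schematic_text : String) : Bool :=
  let st := (PySem.Str.splitlines schematic_text).foldl bStep
      (List.replicate skeletonMarkers.length false, false, false)
  if !st.2.2 then true
  else st.1.all id && !st.2.1

-- ===== PRECONDITION & SPEC =====
def Spec_looks_like_empty_schematic_skeleton_py (schematic_text : String) (out : Bool) : Prop := out = looks_like_empty_schematic_skeleton_py_alt schematic_text
instance (schematic_text : String) (out : Bool) : Decidable (Spec_looks_like_empty_schematic_skeleton_py schematic_text out) := by unfold Spec_looks_like_empty_schematic_skeleton_py; infer_instance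

-- ===== CLAIM (what is proved, stated in full; the proofs are below) =====
def Claim_equal_looks_like_empty_schematic_skeleton_py : Prop := ∀ (schematic_text : String), Dom_looks_like_empty_schematic_skeleton_py schematic_text → Spec_looks_like_empty_schematic_skeleton_py schematic_text (looks_like_empty_schematic_skeleton_py schematic_text)

-- ===== LEMMAS AND PROOFS =====

-- a sub not containing c sits inside a ++ c :: b iff it sits inside a or inside b
lemma infix_append_cons {α : Type} (sub a b : List α) (c : α) (hc : c ∉ sub) :
    sub <:+: a ++ c :: b ↔ sub <:+: a ∨ sub <:+: b := by
  constructor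
  · rintro ⟨s, t, hst⟩
    by_cases h1 : s.length + sub.length ≤ a.length
    · left
      have hp : s ++ sub <+: a ++ c :: b := ⟨t, by simpa [List.append_assoc] using hst⟩
      have hpa : s ++ sub <+: a :=
        List.prefix_of_prefix_length_le hp (List.prefix_append a (c :: b)) (by simp; omega)
      exact (List.suffix_append s sub).isInfix.trans hpa.isInfix
    · by_cases h2 : a.length + 1 ≤ s.length
      · right
        have hq : sub ++ t <:+ a ++ c :: b := ⟨s, by simpa [List.append_assoc] using hst⟩
        have hb : b <:+ a ++ c :: b := by
          have := List.suffix_append (a ++ [c]) b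
          simpa using this
        have hlen : (sub ++ t).length ≤ b.length := by
          have := congrArg List.length hst
          simp at this ⊢
          omega
        have hqb : sub ++ t <:+ b := List.suffix_of_suffix_length_le hq hb hlen
        exact (List.prefix_append sub t).isInfix.trans hqb.isInfix
      · exfalso
        rw [not_le] at h1 h2
        have hget := congrArg (fun l => l[a.length]?) hst
        simp only at hget
        rw [List.append_assoc] at hget
        rw [List.getElem?_append_right (by omega)] at hget
        rw [List.getElem?_append_left (by omega)] at hget
        rw [List.getElem?_append_right (by omega)] at hget
        simp at hget
        exact hc (List.mem_of_getElem? hget)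
  · rintro (h | h)
    · exact h.trans (List.prefix_append a (c :: b)).isInfix
    · refine h.trans ?_
      have := List.suffix_append (a ++ [c]) b
      simp at this
      exact this.isInfix

-- membership of a '\n'-free substring in a "\n"-join is membership in some part
lemma isIn_join_nl (sub : List Char) (h : '\n' ∉ sub) :
    ∀ (L : List (List Char)), L ≠ [] →
      PySem.Chars.isIn sub (PySem.Chars.join ['\n'] L) = L.any (fun l => PySem.Chars.isIn sub l) := by
  intro L
  induction L with
  | nil => intro hL; exact absurd rfl hL
  | cons l r ih =>
    intro _
    cases r with
    | nil => simp [PySem.Chars.join_singleton]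
    | cons l2 r2 =>
      rw [PySem.Chars.join_cons_cons]
      rw [Bool.eq_iff_iff]
      rw [PySem.Chars.isIn_iff_infix]
      rw [show l ++ ['\n'] ++ PySem.Chars.join ['\n'] (l2 :: r2)
            = l ++ '\n' :: PySem.Chars.join ['\n'] (l2 :: r2) by simp]
      rw [infix_append_cons sub _ _ _ h]
      rw [← PySem.Chars.isIn_iff_infix, ← PySem.Chars.isIn_iff_infix]
      rw [ih (by simp)]
      simp

-- Str-level version
lemma isIn_join_str (sub : String) (h : '\n' ∉ sub.toList) (L : List String) (hL : L ≠ []) :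
    PySem.Str.isIn sub (PySem.Str.join "\n" L) = L.any (fun l => PySem.Str.isIn sub l) := by
  rw [PySem.Str.isIn_eq, PySem.Str.toList_join]
  rw [show "\n".toList = ['\n'] from rfl]
  rw [isIn_join_nl sub.toList h (L.map String.toList) (by simpa using hL)]
  simp [List.any_map, Function.comp_def, PySem.Str.isIn_eq]

lemma all_congr_mem {α : Type} (l : List α) (p q : α → Bool) (h : ∀ x ∈ l, p x = q x) :
    l.all p = l.all q := by
  rw [Bool.eq_iff_iff]; simp only [List.all_eq_true]
  exact ⟨fun H x hx => (h x hx) ▸ H x hx, fun H x hx => (h x hx) ▸ H x hx⟩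

lemma any_congr_mem {α : Type} (l : List α) (p q : α → Bool) (h : ∀ x ∈ l, p x = q x) :
    l.any p = l.any q := by
  rw [Bool.eq_iff_iff]; simp only [List.any_eq_true]
  exact ⟨fun ⟨x, hx, H⟩ => ⟨x, hx, (h x hx) ▸ H⟩, fun ⟨x, hx, H⟩ => ⟨x, hx, (h x hx) ▸ H⟩⟩

lemma any_swap {α β : Type} (l : List α) (r : List β) (p : α → β → Bool) :
    l.any (fun x => r.any fun y => p x y) = r.any (fun y => l.any fun x => p x y) := by
  rw [Bool.eq_iff_iff]; simp only [List.any_eq_true]; tauto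

-- B's fold over raw lines is a fold of the stripped step over the stripped non-empty lines
lemma foldl_bStep_filter (lines : List String) :
    ∀ (st : List Bool × Bool × Bool),
      lines.foldl bStep st =
        ((lines.filter (fun line => PySem.Str.strip line != "")).map
            (fun line => PySem.Str.strip line)).foldl
          (fun st line =>
            (List.zipWith (fun f m => f || PySem.Str.isIn m line) st.1 skeletonMarkers,
             st.2.1 || contentMarkers.any (fun m => PySem.Str.isIn m line),
             true)) st := by
  induction lines with
  | nil => intro st; rfl
  | cons l r ih =>
    intro st
    by_cases h : PySem.Str.strip l = ""
    · simp [List.foldl_cons, h, bStep, ih]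
    · simp [List.foldl_cons, h, bStep, ih]

lemma zipWith_id_left {α β : Type} (fs : List α) :
    ∀ (sk : List β), fs.length ≤ sk.length → List.zipWith (fun f _ => f) fs sk = fs := by
  induction fs with
  | nil => intro sk _; rfl
  | cons f fr ih =>
    intro sk h
    cases sk with
    | nil => simp at h
    | cons m mr => simp at h; simp [ih mr h]

lemma zipWith_zipWith_same {α β γ δ : Type} (g : γ → β → δ) (h : α → β → γ) (fs : List α) :
    ∀ (sk : List β), List.zipWith g (List.zipWith h fs sk) sk
      = List.zipWith (fun f m => g (h f m) m) fs sk := by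
  induction fs with
  | nil => intro sk; rfl
  | cons f fr ih =>
    intro sk
    cases sk with
    | nil => rfl
    | cons m mr => simp [ih mr]

-- the stripped fold, component-wise
lemma foldl_stripped (LS : List String) :
    ∀ (fs : List Bool) (c e : Bool), fs.length ≤ skeletonMarkers.length →
      LS.foldl
          (fun st line =>
            (List.zipWith (fun f m => f || PySem.Str.isIn m line) st.1 skeletonMarkers,
             st.2.1 || contentMarkers.any (fun m => PySem.Str.isIn m line),
             true)) (fs, c, e) =
        (List.zipWith (fun f m => f || LS.any (fun l => PySem.Str.isIn m l)) fs skeletonMarkers,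
         c || LS.any (fun l => contentMarkers.any (fun m => PySem.Str.isIn m l)),
         e || !LS.isEmpty) := by
  induction LS with
  | nil =>
    intro fs c e h
    simp [zipWith_id_left fs skeletonMarkers h]
  | cons l r ih =>
    intro fs c e h
    rw [List.foldl_cons, ih _ _ _ (by simp [List.length_zipWith])]
    rw [zipWith_zipWith_same]
    simp [Bool.or_assoc]

lemma zipWith_or_replicate_all (sk : List String) (g : String → Bool) :
    (List.zipWith (fun f m => f || g m) (List.replicate sk.length false) sk).all id = sk.all g := by
  induction sk with
  | nil => rfl
  | cons m r ih => simp [List.replicate_succ, ih]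

lemma nl_not_mem_skeleton : ∀ m ∈ skeletonMarkers, '\n' ∉ m.toList := by decide
lemma nl_not_mem_content : ∀ m ∈ contentMarkers, '\n' ∉ m.toList := by decide

-- ===== VERDICT (by name: the statement is the Claim_ definition above) =====
theorem looks_like_empty_schematic_skeleton_py_spec : Claim_equal_looks_like_empty_schematic_skeleton_py := by
  intro s _
  unfold Spec_looks_like_empty_schematic_skeleton_py
  unfold looks_like_empty_schematic_skeleton_py looks_like_empty_schematic_skeleton_py_alt
  rw [foldl_bStep_filter, foldl_stripped _ _ _ _ (by simp)]
  set LS := ((PySem.Str.splitlines s).filter (fun line => PySem.Str.strip line != "")).map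
      (fun line => PySem.Str.strip line) with hLS
  by_cases hE : LS.isEmpty
  · simp [hE]
  · have hne : LS ≠ [] := by
      intro h; rw [h] at hE; simp at hE
    simp only [hE, Bool.not_false, Bool.not_true, Bool.false_or]
    rw [zipWith_or_replicate_all]
    rw [all_congr_mem skeletonMarkers _ _
        (fun m hm => isIn_join_str m (nl_not_mem_skeleton m hm) LS hne)]
    rw [any_congr_mem contentMarkers _ _
        (fun m hm => isIn_join_str m (nl_not_mem_content m hm) LS hne)]
    rw [any_swap]
    cases skeletonMarkers.all (fun m => LS.any fun l => PySem.Str.isIn m l) <;> simp
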